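-- pv_equiv track=rewrite | github.com/elaplas/data_structure_and_algos | puzzels/max_distance/max_distance.py | max_distance_1
-- ===== SOURCE A (Python) =====
-- def max_distance_1(arr):
--
--     res = -1
--     for i in range(len(arr)):
--         for j in range(i+1, len(arr)):
--
--             if arr[j] > arr[i]:
--                 if j - i > res:
--                     res = j - i
--     return res
-- ===== SOURCE B (Python) =====
-- def max_distance_1(arr):
--     n = len(arr)
--     for d in range(n - 1, 0, -1):
--         if any(arr[i + d] > arr[i] for i in range(n - d)):
--             return d
--     return -1
-- ===== Notes on version B (the rewrite author's own statement) =====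
-- stated objective: faster
-- what changed: Instead of scanning every pair (i,j) and keeping the max gap, B scans candidate gaps d from largest to smallest and returns the first d for which some i has arr[i+d] > arr[i], so it stops at the answer instead of always doing the full quadratic pass.
import Mathlib
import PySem

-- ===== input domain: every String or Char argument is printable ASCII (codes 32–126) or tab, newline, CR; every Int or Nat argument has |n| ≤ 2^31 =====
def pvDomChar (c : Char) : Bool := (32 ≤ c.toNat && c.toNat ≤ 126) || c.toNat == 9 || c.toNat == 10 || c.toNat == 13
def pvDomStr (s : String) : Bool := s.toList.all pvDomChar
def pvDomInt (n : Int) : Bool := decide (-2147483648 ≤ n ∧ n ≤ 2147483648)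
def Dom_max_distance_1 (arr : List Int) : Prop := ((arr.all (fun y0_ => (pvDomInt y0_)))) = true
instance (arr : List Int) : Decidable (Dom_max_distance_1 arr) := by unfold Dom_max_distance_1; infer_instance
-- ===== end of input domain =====

-- B replaces A's full scan over all index pairs by a scan over candidate gaps d = n-1, …, 1
-- returning the first gap realised by some pair (objective: faster — early exit at the answer).



-- ===== PORT A =====
def max_distance_1 (arr : List Int) : Int :=
  (PySem.List.pyRange 0 (arr.length : Int) 1).foldl (fun res i =>
    (PySem.List.pyRange (i + 1) (arr.length : Int) 1).foldl (fun res j =>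
      if PySem.List.pyGetD arr j 0 > PySem.List.pyGetD arr i 0 then
        if j - i > res then j - i else res
      else res) res) (-1)

-- ===== PORT B =====
-- any(arr[i + d] > arr[i] for i in range(n - d))
def altCheck (arr : List Int) (d : Nat) : Bool :=
  (List.range (arr.length - d)).any (fun i => arr.getD (i + d) 0 > arr.getD i 0)

-- for d in range(n - 1, 0, -1): if check(d): return d;  fall-through: return -1
def altLoop (arr : List Int) : Nat → Int
  | 0 => -1
  | d + 1 => if altCheck arr (d + 1) then ((d : Int) + 1) else altLoop arr d

def max_distance_1_alt (arr : List Int) : Int :=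
  altLoop arr (arr.length - 1)

-- ===== PRECONDITION & SPEC =====
def Spec_max_distance_1 (arr : List Int) (out : Int) : Prop := out = max_distance_1_alt arr
instance (arr : List Int) (out : Int) : Decidable (Spec_max_distance_1 arr out) := by unfold Spec_max_distance_1; infer_instance

-- ===== CLAIM (what is proved, stated in full; the proofs are below) =====
def Claim_equal_max_distance_1 : Prop := ∀ (arr : List Int), Dom_max_distance_1 arr → Spec_max_distance_1 arr (max_distance_1 arr)

-- ===== LEMMAS AND PROOFS =====

-- a pair (i, j), i < j, with arr[j] > arr[i]
def GoodPair (arr : List Int) (i j : Nat) : Prop :=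
  i < j ∧ j < arr.length ∧ arr.getD i 0 < arr.getD j 0

-- A's update step is a conditional max; its fold over any list computes
-- max(r, {v x | x ∈ L, p x}): lower bound, attainment, completeness.
theorem condmax_spec {β : Type} (p : β → Bool) (v : β → Int) (L : List β) (r : Int) :
    r ≤ L.foldl (fun acc x => if p x then (if v x > acc then v x else acc) else acc) r ∧
    (L.foldl (fun acc x => if p x then (if v x > acc then v x else acc) else acc) r = r ∨
      ∃ x ∈ L, p x ∧ L.foldl (fun acc x => if p x then (if v x > acc then v x else acc) else acc) r = v x) ∧
    (∀ x ∈ L, p x → v x ≤ L.foldl (fun acc x => if p x then (if v x > acc then v x else acc) else acc) r) := by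
  induction L generalizing r with
  | nil => simp
  | cons a L ih =>
    simp only [List.foldl_cons]
    rcases ih (if p a then (if v a > r then v a else r) else r) with ⟨h1, h2, h3⟩
    refine ⟨?_, ?_, ?_⟩
    · refine le_trans ?_ h1; split_ifs <;> omega
    · rcases h2 with h2 | ⟨x, hx, hp, he⟩
      · by_cases hpa : p a
        · by_cases hv : v a > r
          · right; exact ⟨a, by simp, hpa, by rw [h2]; simp [hpa, hv]⟩
          · left; rw [h2]; simp [hpa, hv]
        · left; rw [h2]; simp [hpa]
      · right; exact ⟨x, by simp [hx], hp, he⟩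
    · intro x hx hp
      rcases List.mem_cons.mp hx with rfl | hx
      · refine le_trans ?_ h1; simp [hp]; split_ifs <;> omega
      · exact h3 x hx hp

-- A's nested loops, flattened to one conditional-max fold over the list of all pairs
def pairsL (arr : List Int) : List (Int × Int) :=
  (PySem.List.pyRange 0 (arr.length : Int) 1).flatMap (fun i =>
    (PySem.List.pyRange (i + 1) (arr.length : Int) 1).map (fun j => (i, j)))

theorem A_as_condmax (arr : List Int) :
    max_distance_1 arr =
      (pairsL arr).foldl (fun acc x =>
        if decide (PySem.List.pyGetD arr x.2 0 > PySem.List.pyGetD arr x.1 0) then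
          (if x.2 - x.1 > acc then x.2 - x.1 else acc) else acc) (-1) := by
  unfold max_distance_1 pairsL
  rw [List.foldl_flatMap]
  simp [List.foldl_map]

theorem mem_pairsL (arr : List Int) (x : Int × Int) :
    x ∈ pairsL arr ↔ 0 ≤ x.1 ∧ x.1 < x.2 ∧ x.2 < (arr.length : Int) := by
  unfold pairsL
  simp [List.mem_flatMap, PySem.List.mem_pyRange_one, Prod.ext_iff]
  omega

-- A's result: either -1, or the gap of some good pair; and it bounds every good gap
theorem A_facts (arr : List Int) :
    (max_distance_1 arr = -1 ∨
      ∃ i j : Nat, GoodPair arr i j ∧ max_distance_1 arr = (j : Int) - (i : Int)) ∧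
    (∀ i j : Nat, GoodPair arr i j → (j : Int) - (i : Int) ≤ max_distance_1 arr) := by
  rw [A_as_condmax]
  obtain ⟨h1, h2, h3⟩ := condmax_spec
    (fun x : Int × Int => decide (PySem.List.pyGetD arr x.2 0 > PySem.List.pyGetD arr x.1 0))
    (fun x : Int × Int => x.2 - x.1) (pairsL arr) (-1)
  constructor
  · rcases h2 with h2 | ⟨x, hx, hp, he⟩
    · exact Or.inl h2
    · right
      obtain ⟨hx0, hx1, hx2⟩ := (mem_pairsL arr x).mp hx
      simp only [decide_eq_true_eq] at hp
      have e1 : PySem.List.pyGetD arr x.1 0 = arr.getD x.1.toNat 0 := by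
        rw [show x.1 = ((x.1.toNat : Nat) : Int) by omega, PySem.List.pyGetD_natCast]; simp [max_eq_left hx0]
      have e2 : PySem.List.pyGetD arr x.2 0 = arr.getD x.2.toNat 0 := by
        rw [show x.2 = ((x.2.toNat : Nat) : Int) by omega, PySem.List.pyGetD_natCast]; simp [max_eq_left (le_trans hx0 (le_of_lt hx1))]
      refine ⟨x.1.toNat, x.2.toNat, ⟨by omega, by omega, ?_⟩, by rw [he]; omega⟩
      rw [← e1, ← e2]
      exact hp
  · rintro i j ⟨hij, hjl, hlt⟩
    have hm : ((i : Int), (j : Int)) ∈ pairsL arr := (mem_pairsL arr _).mpr (by simp; omega)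
    have := h3 _ hm (by
      simp only [decide_eq_true_eq, PySem.List.pyGetD_natCast, gt_iff_lt]
      exact hlt)
    simpa using this

theorem altCheck_iff (arr : List Int) (d : Nat) :
    altCheck arr d = true ↔ ∃ i : Nat, i + d < arr.length ∧ arr.getD i 0 < arr.getD (i + d) 0 := by
  unfold altCheck
  simp only [List.any_eq_true, List.mem_range, decide_eq_true_eq, gt_iff_lt]
  constructor
  · rintro ⟨i, hi, hlt⟩; exact ⟨i, by omega, hlt⟩
  · rintro ⟨i, hi, hlt⟩; exact ⟨i, by omega, hlt⟩

-- B's countdown: either no gap in 1..d is good, or it returns the largest good gap in 1..d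
theorem altLoop_spec (arr : List Int) (d : Nat) :
    (altLoop arr d = -1 ∧ ∀ e, 1 ≤ e → e ≤ d → altCheck arr e = false) ∨
    (∃ e, 1 ≤ e ∧ e ≤ d ∧ altCheck arr e = true ∧ altLoop arr d = (e : Int) ∧
      ∀ e', e < e' → e' ≤ d → altCheck arr e' = false) := by
  induction d with
  | zero => left; exact ⟨rfl, by omega⟩
  | succ d ih =>
    by_cases hc : altCheck arr (d + 1) = true
    · right
      exact ⟨d + 1, by omega, by omega, hc, by simp [altLoop, hc], by omega⟩
    · have hl : altLoop arr (d + 1) = altLoop arr d := by simp [altLoop, hc]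
      rcases ih with ⟨h1, h2⟩ | ⟨e, he1, he2, he3, he4, he5⟩
      · left
        refine ⟨by rw [hl, h1], fun e h1e hed => ?_⟩
        by_cases hd : e = d + 1
        · subst hd; simpa using hc
        · exact h2 e h1e (by omega)
      · right
        refine ⟨e, he1, by omega, he3, by rw [hl, he4], fun e' h1 h2 => ?_⟩
        by_cases hd : e' = d + 1
        · subst hd; simpa using hc
        · exact he5 e' h1 (by omega)

theorem final (arr : List Int) : max_distance_1 arr = max_distance_1_alt arr := by
  obtain ⟨hA, hAmax⟩ := A_facts arr
  unfold max_distance_1_alt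
  rcases altLoop_spec arr (arr.length - 1) with ⟨hB, hBno⟩ | ⟨e, he1, he2, he3, he4, he5⟩
  · -- B found nothing: no good pair exists, so A = -1
    rw [hB]
    rcases hA with h | ⟨i, j, hg, hv⟩
    · exact h
    · exfalso
      obtain ⟨hij, hjl, hlt⟩ := hg
      have hcheck : altCheck arr (j - i) = true :=
        (altCheck_iff arr (j - i)).mpr ⟨i, by omega, by rwa [show i + (j - i) = j by omega]⟩
      have := hBno (j - i) (by omega) (by omega)
      simp [hcheck] at this
  · -- B returned e; e is a good gap, maximal
    rw [he4]
    obtain ⟨i, hie, hlt⟩ := (altCheck_iff arr e).mp he3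
    have hgood : GoodPair arr i (i + e) := ⟨by omega, hie, hlt⟩
    have hAe : (e : Int) ≤ max_distance_1 arr := by
      have := hAmax i (i + e) hgood
      omega
    -- and A itself is a good gap ≤ e by maximality
    rcases hA with h | ⟨i', j', hg', hv'⟩
    · omega
    · obtain ⟨hij', hjl', hlt'⟩ := hg'
      have hcheck' : altCheck arr (j' - i') = true :=
        (altCheck_iff arr (j' - i')).mpr ⟨i', by omega, by rwa [show i' + (j' - i') = j' by omega]⟩
      by_cases hle : j' - i' ≤ e
      · omega
      · have := he5 (j' - i') (by omega) (by omega)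
        simp [hcheck'] at this

-- ===== VERDICT (by name: the statement is the Claim_ definition above) =====
theorem max_distance_1_spec : Claim_equal_max_distance_1 := by
  intro arr _
  unfold Spec_max_distance_1
  exact final arr
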